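-- pv_equiv track=rewrite | github.com/itachi1010/hackerrank-competition-code- | main3.2.py | can_visit_all_indices
-- ===== SOURCE A (Python) =====
-- def hamming_distance(str1, str2):
--     return sum(c1 != c2 for c1, c2 in zip(str1, str2))
--
-- def dfs(graph, visited, node):
--     visited.add(node)
--     for neighbor in graph[node]:
--         if neighbor not in visited:
--             dfs(graph, visited, neighbor)
--
-- def can_visit_all_indices(strings):
--     n = len(strings)
--     graph = {i: [] for i in range(n)}
--
--     for i in range(n):
--         for j in range(n):
--             if i != j and hamming_distance(strings[i], strings[j]) == 1:
--                 graph[i].append(j)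
--
--     for i in range(n):
--         visited = set()
--         dfs(graph, visited, i)
--         if len(visited) == n:
--             return "YES"
--
--     return "NO"
-- ===== SOURCE B (Python) =====
-- def hamming(s, t):
--     return sum(1 for a, b in zip(s, t) if a != b)
--
-- def can_visit_all_indices(strings):
--     # Single BFS from index 0 (the Hamming graph is undirected, so one
--     # traversal decides connectivity); edges are tested on the fly.
--     n = len(strings)
--     if n == 0:
--         return "NO"
--     visited = [False] * n
--     visited[0] = True
--     count = 1
--     stack = [0]
--     while stack:
--         u = stack.pop()
--         su = strings[u]
--         for v in range(n):
--             if not visited[v] and hamming(su, strings[v]) == 1: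
--                 visited[v] = True
--                 count += 1
--                 stack.append(v)
--     return "YES" if count == n else "NO"
-- ===== Notes on version B (the rewrite author's own statement) =====
-- stated objective: faster
-- what changed: A builds an adjacency-list graph dict and runs a recursive DFS from EVERY index until one visits all n nodes; B exploits that the Hamming-distance-1 relation is symmetric and does a single iterative stack-based traversal from index 0 with a boolean visited array and a running count, testing edges on the fly.
import Mathlib
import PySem

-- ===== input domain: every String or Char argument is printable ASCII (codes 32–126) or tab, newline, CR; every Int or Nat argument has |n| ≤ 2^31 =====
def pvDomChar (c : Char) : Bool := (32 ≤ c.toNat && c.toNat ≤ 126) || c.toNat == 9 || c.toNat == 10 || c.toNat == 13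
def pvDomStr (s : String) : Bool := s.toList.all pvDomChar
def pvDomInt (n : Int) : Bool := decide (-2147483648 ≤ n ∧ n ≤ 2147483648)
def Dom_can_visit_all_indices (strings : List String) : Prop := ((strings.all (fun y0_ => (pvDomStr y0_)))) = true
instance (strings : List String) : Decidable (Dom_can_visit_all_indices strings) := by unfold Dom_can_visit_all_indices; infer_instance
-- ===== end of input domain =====

-- B does a single traversal instead of A's DFS from every start; return values agree on all inputs (no mutation involved).

-- ===== PORT A =====
-- sum(c1 != c2 for c1, c2 in zip(str1, str2))
def hamming_distance (str1 str2 : String) : Int :=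
  (str1.toList.zip str2.toList).foldl (fun acc c => if c.1 ≠ c.2 then acc + 1 else acc) 0

-- graph = {i: [] for i in range(n)}; the two nested loops appending j to graph[i]
def buildGraph (strings : List String) : PySem.Dict Int (List Int) :=
  let n : Int := PySem.List.len strings
  let g0 := (PySem.List.pyRange 0 n 1).foldl (fun d i => d.insert i ([] : List Int)) PySem.Dict.empty
  (PySem.List.pyRange 0 n 1).foldl (fun d i =>
    (PySem.List.pyRange 0 n 1).foldl (fun d j =>
      if i ≠ j ∧ hamming_distance (PySem.List.pyGetD strings i "") (PySem.List.pyGetD strings j "") = 1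
      then d.modify i [] (fun l => l ++ [j]) else d) d) g0

-- def dfs(graph, visited, node): visited.add(node); for neighbor in graph[node]: if neighbor not in visited: dfs(...)
-- (fuel = number of strings bounds the recursion depth; Python's recursion needs no bound because each call marks a fresh node)
mutual
def dfsA (g : PySem.Dict Int (List Int)) (fuel : Nat) (visited : PySem.Set Int) (node : Int) : PySem.Set Int :=
  match fuel with
  | 0 => PySem.Set.add visited node
  | Nat.succ f => dfsListA g f (g.getD node []) (PySem.Set.add visited node)
termination_by (fuel, 0)
def dfsListA (g : PySem.Dict Int (List Int)) (f : Nat) (l : List Int) (visited : PySem.Set Int) : PySem.Set Int :=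
  match l with
  | [] => visited
  | nb :: rest => dfsListA g f rest (if PySem.Set.contains visited nb then visited else dfsA g f visited nb)
termination_by (f, l.length + 1)
end

-- for i in range(n): visited = set(); dfs(graph, visited, i); if len(visited) == n: return "YES" / return "NO"
def loopA (g : PySem.Dict Int (List Int)) (fuelN : Nat) (n : Int) : List Int → String
  | [] => "NO"
  | i :: rest =>
    if PySem.Set.len (dfsA g fuelN PySem.Set.empty i) = n then "YES" else loopA g fuelN n rest

def can_visit_all_indices (strings : List String) : String :=
  let n : Int := PySem.List.len strings
  let graph := buildGraph strings
  loopA graph strings.length n (PySem.List.pyRange 0 n 1)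

-- ===== PORT B =====
-- sum(1 for a, b in zip(s, t) if a != b)
def hammingB (s t : String) : Int :=
  ((s.toList.zip t.toList).countP (fun c => c.1 != c.2) : Int)

-- the body of B's inner 'for v in range(n)' loop; state = (visited, count, stack)
def bfsInner (strings : List String) (su : String) (acc : List Bool × Int × List Int) (v : Int) :
    List Bool × Int × List Int :=
  if ¬ (PySem.List.pyGetD acc.1 v false = true) ∧ hammingB su (PySem.List.pyGetD strings v "") = 1
  then (PySem.List.pySetD acc.1 v true, acc.2.1 + 1, acc.2.2 ++ [v])
  else acc

-- while stack: u = stack.pop(); for v in range(n): ...  (fuel = number of strings bounds the iterations: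
-- each iteration pops once and every push marks a fresh index)
def bfsLoop (strings : List String) (n : Int) : Nat → List Bool → Int → List Int → List Bool × Int
  | fuel, vis, cnt, stk =>
    match stk.getLast? with
    | none => (vis, cnt)
    | some u =>
      match fuel with
      | 0 => (vis, cnt)
      | Nat.succ f =>
        let su := PySem.List.pyGetD strings u ""
        let r := (PySem.List.pyRange 0 n 1).foldl (bfsInner strings su) (vis, cnt, stk.dropLast)
        bfsLoop strings n f r.1 r.2.1 r.2.2

def can_visit_all_indices_alt (strings : List String) : String :=
  let n : Int := PySem.List.len strings
  if n = 0 then "NO"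
  else
    let visited := PySem.List.pySetD (List.replicate strings.length false) 0 true
    let r := bfsLoop strings n strings.length visited 1 [0]
    if r.2 = n then "YES" else "NO"

-- ===== PRECONDITION & SPEC =====
def Spec_can_visit_all_indices (strings : List String) (out : String) : Prop := out = can_visit_all_indices_alt strings
instance (strings : List String) (out : String) : Decidable (Spec_can_visit_all_indices strings out) := by unfold Spec_can_visit_all_indices; infer_instance

-- ===== CLAIM (what is proved, stated in full; the proofs are below) =====
def Claim_equal_can_visit_all_indices : Prop := ∀ (strings : List String), Dom_can_visit_all_indices strings → Spec_can_visit_all_indices strings (can_visit_all_indices strings)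

-- ===== LEMMAS AND PROOFS =====

-- the node set 0..n-1, string lookup, the Hamming-distance-1 relation, reachability
def nodes (S : List String) : List Int := PySem.List.pyRange 0 (PySem.List.len S) 1
def sg (S : List String) (i : Int) : String := PySem.List.pyGetD S i ""
def adjS (S : List String) (u v : Int) : Prop :=
  u ∈ nodes S ∧ v ∈ nodes S ∧ hammingB (sg S u) (sg S v) = 1
def Rch (S : List String) : Int → Int → Prop := Relation.ReflTransGen (adjS S)
def nbrs (S : List String) (i : Int) : List Int :=
  (nodes S).filter (fun j => decide (i ≠ j ∧ hammingB (sg S i) (sg S j) = 1))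

-- Hamming-distance facts
lemma ham_eq (s t : String) : hamming_distance s t = hammingB s t := by
  unfold hamming_distance hammingB
  rw [show (fun (acc : Int) (c : Char × Char) => if c.1 ≠ c.2 then acc + 1 else acc)
      = (fun acc c => if (fun c : Char × Char => c.1 != c.2) c = true then acc + 1 else acc) by
    funext acc c; simp]
  rw [PySem.List.foldl_count_if]
  simp

lemma ham_symm (s t : String) : hammingB s t = hammingB t s := by
  unfold hammingB
  rw [← List.zip_swap t.toList s.toList, List.countP_map]
  norm_num
  refine List.countP_congr (fun x _ => ?_)
  cases x with
  | mk a b =>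
    simp [Function.comp, Prod.swap, bne_iff_ne]
    exact ⟨fun h he => h he.symm, fun h he => h he.symm⟩

lemma ham_self (s : String) : hammingB s s = 0 := by
  have h : ∀ l : List Char, (l.zip l).countP (fun c => c.1 != c.2) = 0 := by
    intro l
    induction l with
    | nil => simp
    | cons a l ih => simp [List.zip_cons_cons, ih]
  simp [hammingB, h]

lemma adj_symm (S : List String) : Symmetric (adjS S) := by
  intro u v h
  exact ⟨h.2.1, h.1, by rw [ham_symm]; exact h.2.2⟩

lemma Rch_mem (S : List String) {i x : Int} (h : Rch S i x) (hi : i ∈ nodes S) : x ∈ nodes S := by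
  induction h with
  | refl => exact hi
  | tail _ hadj ih => exact hadj.2.1

lemma mem_nbrs_iff_adj (S : List String) {i : Int} (hi : i ∈ nodes S) (j : Int) :
    j ∈ nbrs S i ↔ adjS S i j := by
  unfold nbrs adjS
  simp only [List.mem_filter, decide_eq_true_eq]
  constructor
  · rintro ⟨hj, _, hham⟩
    exact ⟨hi, hj, hham⟩
  · rintro ⟨_, hj, hham⟩
    refine ⟨hj, ?_, hham⟩
    rintro rfl
    rw [ham_self] at hham
    omega

-- graph characterization
lemma g0_getD (is : List Int) (d : PySem.Dict Int (List Int)) (hd : ∀ k, d.getD k [] = [])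
    (k : Int) : ((is.foldl (fun d i => d.insert i ([] : List Int)) d).getD k []) = [] := by
  induction is generalizing d with
  | nil => exact hd k
  | cons i is ih =>
    simp only [List.foldl_cons]
    exact ih _ (fun k' => by rw [PySem.Dict.getD_insert]; split <;> simp [hd])

lemma inner_getD (S : List String) (i : Int) (js : List Int) (d : PySem.Dict Int (List Int)) (k : Int) :
    ((js.foldl (fun d j =>
        if i ≠ j ∧ hamming_distance (PySem.List.pyGetD S i "") (PySem.List.pyGetD S j "") = 1
        then d.modify i [] (fun l => l ++ [j]) else d) d).getD k [])
    = d.getD k [] ++ (if k = i then js.filter (fun j => decide (i ≠ j ∧ hamming_distance (PySem.List.pyGetD S i "") (PySem.List.pyGetD S j "") = 1)) else []) := by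
  induction js generalizing d with
  | nil => simp
  | cons j js ih =>
    simp only [List.foldl_cons, List.filter_cons]
    by_cases h : i ≠ j ∧ hamming_distance (PySem.List.pyGetD S i "") (PySem.List.pyGetD S j "") = 1
    · rw [if_pos h, ih]
      by_cases hk : k = i
      · subst hk
        rw [if_pos rfl, if_pos rfl, PySem.Dict.getD_modify]
        simp [h]
      · rw [if_neg hk, if_neg hk, PySem.Dict.getD_modify, if_neg hk]
    · rw [if_neg h, ih]
      by_cases hk : k = i <;> simp [hk, h]

lemma outer_getD (S : List String) (js : List Int) (is : List Int) (hnd : is.Nodup)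
    (d : PySem.Dict Int (List Int)) (k : Int) :
    ((is.foldl (fun d i => (js.foldl (fun d j =>
        if i ≠ j ∧ hamming_distance (PySem.List.pyGetD S i "") (PySem.List.pyGetD S j "") = 1
        then d.modify i [] (fun l => l ++ [j]) else d) d)) d).getD k [])
    = d.getD k [] ++ (if k ∈ is then js.filter (fun j => decide (k ≠ j ∧ hamming_distance (PySem.List.pyGetD S k "") (PySem.List.pyGetD S j "") = 1)) else []) := by
  induction is generalizing d with
  | nil => simp
  | cons i is ih =>
    simp only [List.foldl_cons]
    rw [ih (List.nodup_cons.mp hnd).2, inner_getD]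
    by_cases hk : k = i
    · subst hk
      have : k ∉ is := (List.nodup_cons.mp hnd).1
      simp [this]
    · simp only [List.mem_cons]
      by_cases hk2 : k ∈ is <;> simp [hk, hk2]

lemma graph_getD (S : List String) {k : Int} (hk : k ∈ nodes S) :
    (buildGraph S).getD k [] = nbrs S k := by
  have hk' : k ∈ PySem.List.pyRange 0 (PySem.List.len S) 1 := hk
  unfold buildGraph nbrs nodes
  rw [outer_getD S _ _ (PySem.List.nodup_pyRange_one 0 (PySem.List.len S)),
      g0_getD _ _ (fun k => PySem.Dict.getD_empty k [])]
  rw [if_pos hk']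
  simp only [List.nil_append]
  refine List.filter_congr (fun j _ => ?_)
  simp [ham_eq, sg]

-- DFS: monotonicity, nodup, elements, soundness, closedness
lemma dfs_mono (g : PySem.Dict Int (List Int)) (f : Nat) :
    (∀ vis node x, (x ∈ vis ∨ x = node) → x ∈ dfsA g f vis node)
    ∧ (∀ l vis x, x ∈ vis → x ∈ dfsListA g f l vis) := by
  have key : ∀ f', (∀ vis node x, (x ∈ vis ∨ x = node) → x ∈ dfsA g f' vis node) →
      ∀ l vis x, x ∈ vis → x ∈ dfsListA g f' l vis := by
    intro f' hA l
    induction l with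
    | nil => intro vis x hx; simpa [dfsListA] using hx
    | cons nb rest ih =>
      intro vis x hx
      simp only [dfsListA]
      by_cases hc : PySem.Set.contains vis nb = true
      · simp only [hc, if_true]
        exact ih _ _ hx
      · simp only [hc, if_false, Bool.false_eq_true]
        exact ih _ _ (hA _ _ _ (Or.inl hx))
  induction f with
  | zero =>
    have hA : ∀ vis node x, (x ∈ vis ∨ x = node) → x ∈ dfsA g 0 vis node := by
      intro vis node x hx
      simp only [dfsA]
      exact (PySem.Set.mem_add vis node x).mpr hx
    exact ⟨hA, key 0 hA⟩
  | succ f ih =>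
    have hA : ∀ vis node x, (x ∈ vis ∨ x = node) → x ∈ dfsA g (f+1) vis node := by
      intro vis node x hx
      simp only [dfsA]
      exact ih.2 _ _ _ ((PySem.Set.mem_add vis node x).mpr hx)
    exact ⟨hA, key (f+1) hA⟩

lemma dfs_nodup (g : PySem.Dict Int (List Int)) (f : Nat) :
    (∀ vis node, vis.Nodup → (dfsA g f vis node).Nodup)
    ∧ (∀ l vis, vis.Nodup → (dfsListA g f l vis).Nodup) := by
  have key : ∀ f', (∀ vis node, vis.Nodup → (dfsA g f' vis node).Nodup) →
      ∀ l vis, vis.Nodup → (dfsListA g f' l vis).Nodup := by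
    intro f' hA l
    induction l with
    | nil => intro vis hv; simpa [dfsListA] using hv
    | cons nb rest ih =>
      intro vis hv
      simp only [dfsListA]
      by_cases hc : PySem.Set.contains vis nb = true
      · simp only [hc, if_true]; exact ih _ hv
      · simp only [hc, if_false, Bool.false_eq_true]
        exact ih _ (hA _ _ hv)
  induction f with
  | zero =>
    have hA : ∀ vis node, vis.Nodup → (dfsA g 0 vis node).Nodup := by
      intro vis node hv
      simp only [dfsA]
      exact PySem.Set.nodup_add vis node hv
    exact ⟨hA, key 0 hA⟩
  | succ f ih =>
    have hA : ∀ vis node, vis.Nodup → (dfsA g (f+1) vis node).Nodup := by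
      intro vis node hv
      simp only [dfsA]
      exact key f ih.1 _ _ (PySem.Set.nodup_add vis node hv)
    exact ⟨hA, key (f+1) hA⟩

lemma dfsList_elems (g : PySem.Dict Int (List Int)) (f : Nat) (l : List Int) :
    ∀ vis, ∀ u ∈ l, u ∈ dfsListA g f l vis := by
  induction l with
  | nil => simp
  | cons nb rest ih =>
    intro vis u hu
    simp only [dfsListA]
    rcases List.mem_cons.mp hu with rfl | hu'
    · by_cases hc : PySem.Set.contains vis u = true
      · simp only [hc, if_true]
        exact (dfs_mono g f).2 _ _ _ ((PySem.Set.contains_iff _ _).mp hc)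
      · simp only [hc, if_false, Bool.false_eq_true]
        exact (dfs_mono g f).2 _ _ _ ((dfs_mono g f).1 _ _ _ (Or.inr rfl))
    · by_cases hc : PySem.Set.contains vis nb = true <;> simp only [hc, if_true, if_false, Bool.false_eq_true] <;>
        exact ih _ _ hu'

lemma dfs_sound (S : List String) (f : Nat) :
    (∀ vis node, node ∈ nodes S → ∀ x ∈ dfsA (buildGraph S) f vis node, x ∈ vis ∨ Rch S node x)
    ∧ (∀ l vis, (∀ u ∈ l, u ∈ nodes S) → ∀ x ∈ dfsListA (buildGraph S) f l vis,
        x ∈ vis ∨ ∃ u ∈ l, Rch S u x) := by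
  have key : ∀ f', (∀ vis node, node ∈ nodes S → ∀ x ∈ dfsA (buildGraph S) f' vis node, x ∈ vis ∨ Rch S node x) →
      ∀ l vis, (∀ u ∈ l, u ∈ nodes S) → ∀ x ∈ dfsListA (buildGraph S) f' l vis,
        x ∈ vis ∨ ∃ u ∈ l, Rch S u x := by
    intro f' hA l
    induction l with
    | nil => intro vis _ x hx; exact Or.inl (by simpa [dfsListA] using hx)
    | cons nb rest ih =>
      intro vis hl x hx
      simp only [dfsListA] at hx
      by_cases hc : PySem.Set.contains vis nb = true
      · simp only [hc, if_true] at hx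
        rcases ih _ (fun u hu => hl u (List.mem_cons_of_mem _ hu)) x hx with h | ⟨u, hu, hR⟩
        · exact Or.inl h
        · exact Or.inr ⟨u, List.mem_cons_of_mem _ hu, hR⟩
      · simp only [hc, if_false, Bool.false_eq_true] at hx
        rcases ih _ (fun u hu => hl u (List.mem_cons_of_mem _ hu)) x hx with h | ⟨u, hu, hR⟩
        · rcases hA _ _ (hl nb List.mem_cons_self) x h with h2 | h2
          · exact Or.inl h2
          · exact Or.inr ⟨nb, List.mem_cons_self, h2⟩
        · exact Or.inr ⟨u, List.mem_cons_of_mem _ hu, hR⟩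
  induction f with
  | zero =>
    have hA : ∀ vis node, node ∈ nodes S → ∀ x ∈ dfsA (buildGraph S) 0 vis node, x ∈ vis ∨ Rch S node x := by
      intro vis node _ x hx
      simp only [dfsA] at hx
      rcases (PySem.Set.mem_add vis node x).mp hx with h | rfl
      · exact Or.inl h
      · exact Or.inr Relation.ReflTransGen.refl
    exact ⟨hA, key 0 hA⟩
  | succ f ih =>
    have hA : ∀ vis node, node ∈ nodes S → ∀ x ∈ dfsA (buildGraph S) (f+1) vis node, x ∈ vis ∨ Rch S node x := by
      intro vis node hnode x hx
      simp only [dfsA, graph_getD S hnode] at hx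
      have hsub : ∀ u ∈ nbrs S node, u ∈ nodes S :=
        fun u hu => ((mem_nbrs_iff_adj S hnode u).mp hu).2.1
      rcases key f ih.1 _ _ hsub x hx with h | ⟨u, hu, hR⟩
      · rcases (PySem.Set.mem_add vis node x).mp h with h2 | rfl
        · exact Or.inl h2
        · exact Or.inr Relation.ReflTransGen.refl
      · exact Or.inr (Relation.ReflTransGen.head ((mem_nbrs_iff_adj S hnode u).mp hu) hR)
    exact ⟨hA, key (f+1) hA⟩

-- generic counting helpers
lemma countP_flip_one {α : Type} (l : List α) (a : α) (p p' : α → Bool)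
    (hnd : l.Nodup) (ha : a ∈ l) (hother : ∀ x ∈ l, x ≠ a → p' x = p x)
    (hpa' : p' a = false) (hpa : p a = true) : l.countP p' + 1 = l.countP p := by
  induction l with
  | nil => cases ha
  | cons b l ih =>
    by_cases hba : b = a
    · subst hba
      have hbl : b ∉ l := (List.nodup_cons.mp hnd).1
      have heq : l.countP p' = l.countP p :=
        List.countP_congr (fun x hx => by
          rw [hother x (List.mem_cons_of_mem _ hx) (fun e => hbl (e ▸ hx))])
      simp [hpa, hpa', heq]
    · have hal : a ∈ l := by
        rcases List.mem_cons.mp ha with h | h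
        · exact absurd h.symm hba
        · exact h
      have hb' : p' b = p b := hother b List.mem_cons_self hba
      have := ih (List.nodup_cons.mp hnd).2 hal
        (fun x hx hxa => hother x (List.mem_cons_of_mem _ hx) hxa)
      simp only [List.countP_cons, hb']
      omega

lemma countP_or_split {α : Type} (l : List α) (q c : α → Bool) :
    l.countP (fun x => q x || (!q x && c x)) = l.countP q + l.countP (fun x => !q x && c x) := by
  induction l with
  | nil => simp
  | cons a l ih =>
    simp only [List.countP_cons, ih]
    cases hq : q a <;> cases hc : c a <;> simp <;> omega

lemma length_eq_iff_all (d s : List Int) (hd : d.Nodup) (hs : s.Nodup)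
    (hsub : ∀ x ∈ d, x ∈ s) : d.length = s.length ↔ ∀ x ∈ s, x ∈ d := by
  constructor
  · intro hlen x hx
    have h1 : d.toFinset ⊆ s.toFinset :=
      fun a ha => List.mem_toFinset.mpr (hsub a (List.mem_toFinset.mp ha))
    have h2 : s.toFinset.card ≤ d.toFinset.card := by
      rw [List.toFinset_card_of_nodup hd, List.toFinset_card_of_nodup hs, hlen]
    have h3 := Finset.eq_of_subset_of_card_le h1 h2
    have h4 : x ∈ d.toFinset := h3 ▸ List.mem_toFinset.mpr hx
    exact List.mem_toFinset.mp h4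
  · intro hall
    exact ((List.perm_ext_iff_of_nodup hd hs).mpr
      (fun a => ⟨fun h => hsub a h, fun h => hall a h⟩)).length_eq

def unvis (S : List String) (vis : PySem.Set Int) : Nat :=
  (nodes S).countP (fun x => !(PySem.Set.contains vis x))

lemma unvis_mono (S : List String) {vis W : PySem.Set Int} (h : ∀ x ∈ vis, x ∈ W) :
    unvis S W ≤ unvis S vis := by
  refine List.countP_mono_left (fun x _ hx => ?_)
  have hxW : x ∉ W := by
    intro hm
    rw [(PySem.Set.contains_iff W x).mpr hm] at hx
    simp at hx
  have hxv : x ∉ vis := fun hm => hxW (h x hm)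
  cases hcv : PySem.Set.contains vis x with
  | false => simp
  | true => exact absurd ((PySem.Set.contains_iff _ _).mp hcv) hxv

lemma unvis_add (S : List String) {vis : PySem.Set Int} {node : Int}
    (h1 : node ∈ nodes S) (h2 : node ∉ vis) : unvis S (vis.add node) + 1 = unvis S vis := by
  refine countP_flip_one (nodes S) node _ _ (PySem.List.nodup_pyRange_one _ _) h1 ?_ ?_ ?_
  · intro x _ hxne
    by_cases hxv : x ∈ vis
    · simp [PySem.Set.mem_add, hxv]
    · simp [PySem.Set.mem_add, hxv, hxne]
  · simp [PySem.Set.mem_add]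
  · simp [h2]

lemma unvis_pos (S : List String) {vis : PySem.Set Int} {node : Int}
    (h1 : node ∈ nodes S) (h2 : node ∉ vis) : 0 < unvis S vis := by
  rw [unvis, List.countP_pos_iff]
  exact ⟨node, h1, by simp [h2]⟩

lemma dfs_closed (S : List String) (f : Nat) :
    (∀ vis node, node ∈ nodes S → node ∉ vis → unvis S vis ≤ f →
      ∀ u ∈ dfsA (buildGraph S) f vis node, u ∉ vis →
        ∀ v ∈ nbrs S u, v ∈ dfsA (buildGraph S) f vis node)
    ∧ (∀ l vis, (∀ u ∈ l, u ∈ nodes S) → unvis S vis ≤ f →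
      ∀ u ∈ dfsListA (buildGraph S) f l vis, u ∉ vis →
        ∀ v ∈ nbrs S u, v ∈ dfsListA (buildGraph S) f l vis) := by
  have key : ∀ f', (∀ vis node, node ∈ nodes S → node ∉ vis → unvis S vis ≤ f' →
        ∀ u ∈ dfsA (buildGraph S) f' vis node, u ∉ vis → ∀ v ∈ nbrs S u, v ∈ dfsA (buildGraph S) f' vis node) →
      ∀ l vis, (∀ u ∈ l, u ∈ nodes S) → unvis S vis ≤ f' →
        ∀ u ∈ dfsListA (buildGraph S) f' l vis, u ∉ vis → ∀ v ∈ nbrs S u, v ∈ dfsListA (buildGraph S) f' l vis := by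
    intro f' hA l
    induction l with
    | nil =>
      intro vis _ _ u hu hnu v _
      exact absurd (by simpa [dfsListA] using hu) hnu
    | cons nb rest ih =>
      intro vis hl hf u hu hnu v hv
      simp only [dfsListA] at hu ⊢
      by_cases hc : PySem.Set.contains vis nb = true
      · simp only [hc, if_true] at hu ⊢
        exact ih _ (fun w hw => hl w (List.mem_cons_of_mem _ hw)) hf u hu hnu v hv
      · simp only [hc, if_false, Bool.false_eq_true] at hu ⊢
        have hnb : nb ∉ vis := fun hmem => hc ((PySem.Set.contains_iff _ _).mpr hmem)
        have hmono1 : ∀ x ∈ vis, x ∈ dfsA (buildGraph S) f' vis nb :=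
          fun x hx => (dfs_mono _ f').1 _ _ _ (Or.inl hx)
        have hCA := hA vis nb (hl nb List.mem_cons_self) hnb hf
        have hu1 : unvis S (dfsA (buildGraph S) f' vis nb) ≤ f' :=
          le_trans (unvis_mono S hmono1) hf
        by_cases hx1 : u ∈ dfsA (buildGraph S) f' vis nb
        · exact (dfs_mono _ f').2 rest _ v (hCA u hx1 hnu v hv)
        · exact ih _ (fun w hw => hl w (List.mem_cons_of_mem _ hw)) hu1 u hu hx1 v hv
  induction f with
  | zero =>
    have hA : ∀ vis node, node ∈ nodes S → node ∉ vis → unvis S vis ≤ 0 →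
        ∀ u ∈ dfsA (buildGraph S) 0 vis node, u ∉ vis → ∀ v ∈ nbrs S u, v ∈ dfsA (buildGraph S) 0 vis node := by
      intro vis node h1 h2 hf
      exact absurd hf (by have := unvis_pos S h1 h2; omega)
    exact ⟨hA, key 0 hA⟩
  | succ f ih =>
    have hA : ∀ vis node, node ∈ nodes S → node ∉ vis → unvis S vis ≤ f + 1 →
        ∀ u ∈ dfsA (buildGraph S) (f+1) vis node, u ∉ vis → ∀ v ∈ nbrs S u, v ∈ dfsA (buildGraph S) (f+1) vis node := by
      intro vis node hnode hnvis hf u hu hnu v hv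
      simp only [dfsA, graph_getD S hnode] at hu ⊢
      have hU : unvis S (vis.add node) ≤ f := by
        have := unvis_add S hnode hnvis; omega
      have hsub : ∀ w ∈ nbrs S node, w ∈ nodes S :=
        fun w hw => ((mem_nbrs_iff_adj S hnode w).mp hw).2.1
      by_cases hun : u = node
      · subst hun
        exact dfsList_elems _ f _ _ v hv
      · have hnadd : u ∉ vis.add node := by
          rw [PySem.Set.mem_add]
          rintro (h | h) <;> [exact hnu h; exact hun h]
        exact key f ih.1 _ _ hsub hU u hu hnadd v hv
    exact ⟨hA, key (f+1) hA⟩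

lemma nodes_length (S : List String) : (nodes S).length = S.length := by
  simp [nodes, PySem.List.length_pyRange_one, PySem.List.len_eq]

lemma unvis_empty (S : List String) : unvis S PySem.Set.empty = S.length := by
  rw [unvis, ← nodes_length S]
  exact List.countP_eq_length.mpr (fun a _ => by simp [PySem.Set.empty])

lemma A_def (S : List String) : can_visit_all_indices S
    = loopA (buildGraph S) S.length (PySem.List.len S) (nodes S) := rfl

lemma dfs_char (S : List String) {i : Int} (hi : i ∈ nodes S) (x : Int) :
    x ∈ dfsA (buildGraph S) S.length PySem.Set.empty i ↔ Rch S i x := by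
  constructor
  · intro hx
    rcases (dfs_sound S S.length).1 PySem.Set.empty i hi x hx with h | h
    · simp [PySem.Set.empty] at h
    · exact h
  · intro h
    have hfuel : unvis S PySem.Set.empty ≤ S.length := le_of_eq (unvis_empty S)
    induction h with
    | refl => exact (dfs_mono _ _).1 _ _ _ (Or.inr rfl)
    | @tail b c hR hadj ih =>
      have hb : b ∈ nodes S := hadj.1
      have hc : c ∈ nbrs S b := (mem_nbrs_iff_adj S hb c).mpr hadj
      exact (dfs_closed S S.length).1 PySem.Set.empty i hi (by simp [PySem.Set.empty]) hfuel
        b ih (by simp [PySem.Set.empty]) c hc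

-- A-side characterization
lemma loopA_eq (g : PySem.Dict Int (List Int)) (fn : Nat) (n : Int) (is : List Int) :
    (loopA g fn n is = "YES" ↔ ∃ i ∈ is, PySem.Set.len (dfsA g fn PySem.Set.empty i) = n)
    ∧ (loopA g fn n is = "YES" ∨ loopA g fn n is = "NO") := by
  induction is with
  | nil => simp [loopA]
  | cons i rest ih =>
    simp only [loopA]
    by_cases h : PySem.Set.len (dfsA g fn PySem.Set.empty i) = n
    · rw [if_pos h]
      exact ⟨⟨fun _ => ⟨i, List.mem_cons_self, h⟩, fun _ => rfl⟩, Or.inl rfl⟩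
    · rw [if_neg h]
      refine ⟨?_, ih.2⟩
      rw [ih.1]
      simp only [List.mem_cons]
      constructor
      · rintro ⟨j, hj, hy⟩
        exact ⟨j, Or.inr hj, hy⟩
      · rintro ⟨j, hj | hj, hy⟩
        · exact absurd (hj ▸ hy) h
        · exact ⟨j, hj, hy⟩

lemma A_yes_iff (S : List String) :
    can_visit_all_indices S = "YES" ↔ ∃ i ∈ nodes S, ∀ x ∈ nodes S, Rch S i x := by
  rw [A_def, (loopA_eq _ _ _ _).1]
  have conv : ∀ i ∈ nodes S,
      (PySem.Set.len (dfsA (buildGraph S) S.length PySem.Set.empty i) = PySem.List.len S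
        ↔ ∀ x ∈ nodes S, Rch S i x) := by
    intro i hi
    have hnd : (dfsA (buildGraph S) S.length PySem.Set.empty i).Nodup :=
      (dfs_nodup _ _).1 _ _ (by simp [PySem.Set.empty])
    have hsub : ∀ x ∈ dfsA (buildGraph S) S.length PySem.Set.empty i, x ∈ nodes S :=
      fun x hx => Rch_mem S ((dfs_char S hi x).mp hx) hi
    have hlen := length_eq_iff_all _ (nodes S) hnd (PySem.List.nodup_pyRange_one _ _) hsub
    constructor
    · intro h x hx
      have hl : (dfsA (buildGraph S) S.length PySem.Set.empty i).length = (nodes S).length := by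
        rw [nodes_length]
        simp only [PySem.Set.len, PySem.List.len_eq] at h
        exact_mod_cast h
      exact (dfs_char S hi x).mp (hlen.mp hl x hx)
    · intro h
      have hall : ∀ x ∈ nodes S, x ∈ dfsA (buildGraph S) S.length PySem.Set.empty i :=
        fun x hx => (dfs_char S hi x).mpr (h x hx)
      have hl := hlen.mpr hall
      simp only [PySem.Set.len, PySem.List.len_eq]
      rw [hl, nodes_length]
  constructor
  · rintro ⟨i, hi, hy⟩
    exact ⟨i, hi, (conv i hi).mp hy⟩
  · rintro ⟨i, hi, hy⟩
    exact ⟨i, hi, (conv i hi).mpr hy⟩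

lemma A_yes_or_no (S : List String) :
    can_visit_all_indices S = "YES" ∨ can_visit_all_indices S = "NO" := by
  rw [A_def]
  exact (loopA_eq _ _ _ _).2

-- B-side: marking invariants
def markedP (S : List String) (vis : List Bool) (x : Int) : Prop :=
  x ∈ nodes S ∧ PySem.List.pyGetD vis x false = true

def mcount (S : List String) (vis : List Bool) : Nat :=
  (nodes S).countP (fun x => PySem.List.pyGetD vis x false)

lemma pyGetD_pySetD_bool (vis : List Bool) (v x : Int) (hv0 : 0 ≤ v) (hv : v < (vis.length : Int))
    (hx0 : 0 ≤ x) (hx : x < (vis.length : Int)) :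
    PySem.List.pyGetD (PySem.List.pySetD vis v true) x false
    = if x = v then true else PySem.List.pyGetD vis x false := by
  rw [PySem.List.pySetD_of_nonneg _ _ hv0]
  rw [PySem.List.pyGetD_eq_getElem _ _ hx0 (by simpa using hx)]
  rw [List.getElem_set]
  by_cases hxv : x = v
  · subst hxv
    simp
  · rw [if_neg (show ¬v.toNat = x.toNat from fun e => hxv (by omega)), if_neg hxv,
      PySem.List.pyGetD_eq_getElem _ _ hx0 hx]

lemma inner_spec (S : List String) (su : String) (js : List Int) (hnd : js.Nodup)
    (hjs : ∀ v ∈ js, v ∈ nodes S) :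
    ∀ (vis : List Bool) (cnt : Int) (stk : List Int), vis.length = S.length →
      ((js.foldl (bfsInner S su) (vis, cnt, stk)).1.length = S.length
      ∧ (js.foldl (bfsInner S su) (vis, cnt, stk)).2.2
          = stk ++ js.filter (fun v => !(PySem.List.pyGetD vis v false) && decide (hammingB su (sg S v) = 1))
      ∧ (js.foldl (bfsInner S su) (vis, cnt, stk)).2.1
          = cnt + ((js.filter (fun v => !(PySem.List.pyGetD vis v false) && decide (hammingB su (sg S v) = 1))).length : Int)
      ∧ (∀ x ∈ nodes S, (PySem.List.pyGetD (js.foldl (bfsInner S su) (vis, cnt, stk)).1 x false = true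
          ↔ PySem.List.pyGetD vis x false = true
            ∨ x ∈ js.filter (fun v => !(PySem.List.pyGetD vis v false) && decide (hammingB su (sg S v) = 1))))) := by
  induction js with
  | nil => intro vis cnt stk h; simp [h]
  | cons v js ih =>
    intro vis cnt stk hlen
    have hv : v ∈ nodes S := hjs v List.mem_cons_self
    have hvb : 0 ≤ v ∧ v < (S.length : Int) := by
      simpa [nodes, PySem.List.mem_pyRange_one, PySem.List.len_eq] using hv
    have hnd' : js.Nodup := (List.nodup_cons.mp hnd).2
    have hvjs : v ∉ js := (List.nodup_cons.mp hnd).1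
    have hjs' : ∀ w ∈ js, w ∈ nodes S := fun w hw => hjs w (List.mem_cons_of_mem _ hw)
    have hb : ∀ w ∈ nodes S, 0 ≤ w ∧ w < (S.length : Int) := by
      intro w hw
      simpa [nodes, PySem.List.mem_pyRange_one, PySem.List.len_eq] using hw
    simp only [List.foldl_cons, List.filter_cons]
    by_cases hcond : ¬(PySem.List.pyGetD vis v false = true)
        ∧ hammingB su (PySem.List.pyGetD S v "") = 1
    · have hstep : bfsInner S su (vis, cnt, stk) v
          = (PySem.List.pySetD vis v true, cnt + 1, stk ++ [v]) := by
        unfold bfsInner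
        rw [if_pos hcond]
      rw [hstep]
      have hlen' : (PySem.List.pySetD vis v true).length = S.length := by
        rw [PySem.List.pySetD_of_nonneg _ _ hvb.1]
        simpa using hlen
      have hget' : ∀ x, 0 ≤ x → x < (S.length : Int) →
          PySem.List.pyGetD (PySem.List.pySetD vis v true) x false
            = if x = v then true else PySem.List.pyGetD vis x false := by
        intro x h1 h2
        exact pyGetD_pySetD_bool vis v x hvb.1 (by omega) h1 (by omega)
      have hfc : js.filter (fun w => !(PySem.List.pyGetD (PySem.List.pySetD vis v true) w false)
            && decide (hammingB su (sg S w) = 1))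
          = js.filter (fun w => !(PySem.List.pyGetD vis w false)
            && decide (hammingB su (sg S w) = 1)) := by
        refine List.filter_congr (fun w hw => ?_)
        have hwb := hb w (hjs' w hw)
        rw [hget' w hwb.1 hwb.2, if_neg (fun e => hvjs (by rwa [e] at hw))]
      have hpv : (!(PySem.List.pyGetD vis v false) && decide (hammingB su (sg S v) = 1)) = true := by
        have h1 : PySem.List.pyGetD vis v false = false := by
          cases hgv : PySem.List.pyGetD vis v false with
          | false => rfl
          | true => exact absurd hgv hcond.1
        simp [h1, sg, hcond.2]
      rcases ih hnd' hjs' (PySem.List.pySetD vis v true) (cnt + 1) (stk ++ [v]) hlen'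
        with ⟨ha, hb2, hc, hd⟩
      rw [hfc] at hb2 hc hd
      rw [hpv, if_pos rfl]
      refine ⟨ha, ?_, ?_, ?_⟩
      · rw [hb2, List.append_assoc]
        rfl
      · rw [hc]
        simp only [List.length_cons]
        push_cast
        ring
      · intro x hx
        have hxb := hb x hx
        rw [hd x hx, hget' x hxb.1 hxb.2]
        by_cases hxv : x = v
        · subst hxv
          simp
        · simp only [if_neg hxv, List.mem_cons]
          constructor
          · rintro (h | h)
            · exact Or.inl h
            · exact Or.inr (Or.inr h)
          · rintro (h | h | h)
            · exact Or.inl h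
            · exact absurd h hxv
            · exact Or.inr h
    · have hstep : bfsInner S su (vis, cnt, stk) v = (vis, cnt, stk) := by
        unfold bfsInner
        rw [if_neg hcond]
      have hpv : (!(PySem.List.pyGetD vis v false) && decide (hammingB su (sg S v) = 1)) = false := by
        rcases Decidable.not_and_iff_not_or_not.mp hcond with h | h
        · have hg : PySem.List.pyGetD vis v false = true := Decidable.not_not.mp h
          simp [hg]
        · simp [sg, h]
      rw [hstep, hpv, if_neg (by simp)]
      exact ih hnd' hjs' vis cnt stk hlen

lemma mcount_le (S : List String) (vis : List Bool) : mcount S vis ≤ S.length := by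
  rw [mcount, ← nodes_length S]
  exact List.countP_le_length

lemma bfs_loop_spec (S : List String) :
    ∀ (fuel : Nat) (vis : List Bool) (cnt : Int) (stk : List Int),
    vis.length = S.length →
    (∀ x ∈ stk, markedP S vis x) →
    (∀ u, markedP S vis u → u ∉ stk → ∀ v ∈ nodes S, hammingB (sg S u) (sg S v) = 1 → markedP S vis v) →
    (∀ x, markedP S vis x → Rch S 0 x) →
    cnt = (mcount S vis : Int) →
    stk.length + S.length ≤ fuel + mcount S vis →
    ((bfsLoop S (PySem.List.len S) fuel vis cnt stk).2
        = (mcount S (bfsLoop S (PySem.List.len S) fuel vis cnt stk).1 : Int)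
    ∧ (∀ x, markedP S vis x → markedP S (bfsLoop S (PySem.List.len S) fuel vis cnt stk).1 x)
    ∧ (∀ x, markedP S (bfsLoop S (PySem.List.len S) fuel vis cnt stk).1 x → Rch S 0 x)
    ∧ (∀ u, markedP S (bfsLoop S (PySem.List.len S) fuel vis cnt stk).1 u →
        ∀ v ∈ nodes S, hammingB (sg S u) (sg S v) = 1 →
          markedP S (bfsLoop S (PySem.List.len S) fuel vis cnt stk).1 v)) := by
  intro fuel
  induction fuel with
  | zero =>
    intro vis cnt stk hlen hstk hclosed hsound hcnt hbound
    have hm := mcount_le S vis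
    have hstk0 : stk = [] := by
      have : stk.length = 0 := by omega
      exact List.length_eq_zero_iff.mp this
    subst hstk0
    simp only [bfsLoop, List.getLast?_nil]
    exact ⟨hcnt, fun x h => h, hsound,
      fun u hu v hv hham => hclosed u hu (by simp) v hv hham⟩
  | succ f ih =>
    intro vis cnt stk hlen hstk hclosed hsound hcnt hbound
    cases hlast : stk.getLast? with
    | none =>
      have hnil : stk = [] := List.getLast?_eq_none_iff.mp hlast
      subst hnil
      simp only [bfsLoop, List.getLast?_nil]
      exact ⟨hcnt, fun x h => h, hsound,
        fun u hu v hv hham => hclosed u hu (by simp) v hv hham⟩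
    | some u =>
      have hne : stk ≠ [] := fun e => by simp [e] at hlast
      have humem : u ∈ stk := List.mem_of_getLast? hlast
      have huM : markedP S vis u := hstk u humem
      have huN : u ∈ nodes S := huM.1
      have hulast : stk.getLast hne = u := by
        have := List.getLast?_eq_some_getLast hne
        rw [hlast] at this
        exact (Option.some_inj.mp this).symm
      have hsplit : stk.dropLast ++ [u] = stk := by
        rw [← hulast]
        exact List.dropLast_append_getLast hne
      have hstep : bfsLoop S (PySem.List.len S) (f+1) vis cnt stk
          = bfsLoop S (PySem.List.len S) f
            ((PySem.List.pyRange 0 (PySem.List.len S) 1).foldl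
              (bfsInner S (PySem.List.pyGetD S u "")) (vis, cnt, stk.dropLast)).1
            ((PySem.List.pyRange 0 (PySem.List.len S) 1).foldl
              (bfsInner S (PySem.List.pyGetD S u "")) (vis, cnt, stk.dropLast)).2.1
            ((PySem.List.pyRange 0 (PySem.List.len S) 1).foldl
              (bfsInner S (PySem.List.pyGetD S u "")) (vis, cnt, stk.dropLast)).2.2 := by
        conv_lhs => rw [bfsLoop]
        simp only [hlast]
      obtain ⟨ha, hb2, hc, hd⟩ := inner_spec S (PySem.List.pyGetD S u "")
        (PySem.List.pyRange 0 (PySem.List.len S) 1)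
        (PySem.List.nodup_pyRange_one _ _) (fun v hv => hv) vis cnt stk.dropLast hlen
      rw [hstep, hb2, hc]
      set T1 := ((PySem.List.pyRange 0 (PySem.List.len S) 1).foldl
        (bfsInner S (PySem.List.pyGetD S u "")) (vis, cnt, stk.dropLast)).1 with hT1
      set new := (PySem.List.pyRange 0 (PySem.List.len S) 1).filter
        (fun v => !(PySem.List.pyGetD vis v false)
          && decide (hammingB (PySem.List.pyGetD S u "") (sg S v) = 1)) with hnewdef
      have hnewN : ∀ x ∈ new, x ∈ nodes S := fun x hx => List.mem_of_mem_filter hx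
      have hmono : ∀ x, markedP S vis x → markedP S T1 x :=
        fun x hxm => ⟨hxm.1, (hd x hxm.1).mpr (Or.inl hxm.2)⟩
      have hnewM : ∀ x ∈ new, markedP S T1 x :=
        fun x hx => ⟨hnewN x hx, (hd x (hnewN x hx)).mpr (Or.inr hx)⟩
      have hnewHam : ∀ x ∈ new, hammingB (sg S u) (sg S x) = 1 := by
        intro x hx
        have hp := (List.mem_filter.mp hx).2
        simp only [Bool.and_eq_true, decide_eq_true_eq] at hp
        simpa [sg] using hp.2
      have hstk1 : ∀ x ∈ stk.dropLast ++ new, markedP S T1 x := by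
        intro x hx
        rcases List.mem_append.mp hx with h | h
        · exact hmono x (hstk x (List.dropLast_subset stk h))
        · exact hnewM x h
      have hclosed1 : ∀ u', markedP S T1 u' → u' ∉ stk.dropLast ++ new →
          ∀ v ∈ nodes S, hammingB (sg S u') (sg S v) = 1 → markedP S T1 v := by
        intro u' hM' hnot v hvN hham
        have hu'N := hM'.1
        by_cases hu'new : u' ∈ new
        · exact absurd (List.mem_append.mpr (Or.inr hu'new)) hnot
        · have hMold : markedP S vis u' := by
            refine ⟨hu'N, ?_⟩
            rcases (hd u' hu'N).mp hM'.2 with h | h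
            · exact h
            · exact absurd h hu'new
          by_cases hu'u : u' = u
          · by_cases hvm : PySem.List.pyGetD vis v false = true
            · exact hmono v ⟨hvN, hvm⟩
            · have hgv : PySem.List.pyGetD vis v false = false := by
                cases h : PySem.List.pyGetD vis v false with
                | false => rfl
                | true => exact absurd h hvm
              have hham' : hammingB (PySem.List.pyGetD S u "") (PySem.List.pyGetD S v "") = 1 := by
                rw [hu'u] at hham
                exact hham
              have : v ∈ new := by
                rw [hnewdef]
                refine List.mem_filter.mpr ⟨hvN, ?_⟩
                simp [hgv, sg, hham']
              exact hnewM v this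
          · have hu'stk : u' ∉ stk := by
              intro hmem
              rw [← hsplit] at hmem
              rcases List.mem_append.mp hmem with h | h
              · exact hnot (List.mem_append.mpr (Or.inl h))
              · exact hu'u (List.mem_singleton.mp h)
            exact hmono v (hclosed u' hMold hu'stk v hvN hham)
      have hsound1 : ∀ x, markedP S T1 x → Rch S 0 x := by
        intro x hxm
        rcases (hd x hxm.1).mp hxm.2 with h | h
        · exact hsound x ⟨hxm.1, h⟩
        · exact Relation.ReflTransGen.tail (hsound u huM)
            ⟨huN, hxm.1, hnewHam x h⟩
      have hmcount : mcount S T1 = mcount S vis + new.length := by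
        have hcg : (nodes S).countP (fun x => PySem.List.pyGetD T1 x false)
            = (nodes S).countP (fun x => PySem.List.pyGetD vis x false
              || (!(PySem.List.pyGetD vis x false)
                  && decide (hammingB (PySem.List.pyGetD S u "") (sg S x) = 1))) := by
          refine List.countP_congr (fun x hx => ?_)
          rw [Bool.or_eq_true]
          constructor
          · intro hT
            rcases (hd x hx).mp hT with h | h
            · exact Or.inl h
            · exact Or.inr (List.mem_filter.mp h).2
          · intro hOr
            rcases hOr with h | h
            · exact (hd x hx).mpr (Or.inl h)
            · exact (hd x hx).mpr (Or.inr (List.mem_filter.mpr ⟨hx, h⟩))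
        have h2 : new.length = (nodes S).countP (fun x => !(PySem.List.pyGetD vis x false)
            && decide (hammingB (PySem.List.pyGetD S u "") (sg S x) = 1)) := by
          rw [List.countP_eq_length_filter]
          rfl
        calc mcount S T1
            = (nodes S).countP (fun x => PySem.List.pyGetD vis x false
              || (!(PySem.List.pyGetD vis x false)
                  && decide (hammingB (PySem.List.pyGetD S u "") (sg S x) = 1))) := hcg
          _ = mcount S vis + new.length := by rw [countP_or_split, h2]; rfl
      have hcnt1 : cnt + (new.length : Int) = (mcount S T1 : Int) := by
        rw [hmcount, hcnt]
        push_cast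
        ring
      have hbound1 : (stk.dropLast ++ new).length + S.length ≤ f + mcount S T1 := by
        have hpos := List.length_pos_of_ne_nil hne
        rw [List.length_append, List.length_dropLast, hmcount]
        omega
      obtain ⟨c1, c2, c3, c4⟩ := ih T1 (cnt + (new.length : Int)) (stk.dropLast ++ new)
        ha hstk1 hclosed1 hsound1 hcnt1 hbound1
      exact ⟨c1, fun x hx => c2 x (hmono x hx), c3, c4⟩

lemma B_def (S : List String) : can_visit_all_indices_alt S
    = if PySem.List.len S = 0 then "NO"
      else if (bfsLoop S (PySem.List.len S) S.length
          (PySem.List.pySetD (List.replicate S.length false) 0 true) 1 [0]).2 = PySem.List.len S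
        then "YES" else "NO" := rfl

lemma B_yes_iff (S : List String) (hS : S ≠ []) :
    can_visit_all_indices_alt S = "YES" ↔ ∀ x ∈ nodes S, Rch S 0 x := by
  have hn0 : ¬ (PySem.List.len S = 0) := by
    simpa [PySem.List.len_eq, List.length_eq_zero_iff] using hS
  rw [B_def, if_neg hn0]
  set vis0 := PySem.List.pySetD (List.replicate S.length false) 0 true with hv0
  set r := bfsLoop S (PySem.List.len S) S.length vis0 1 [0] with hr
  have hpos : 0 < S.length := List.length_pos_of_ne_nil hS
  have hlen0 : vis0.length = S.length := by
    rw [hv0, PySem.List.pySetD_of_nonneg _ _ (by norm_num : (0:Int) ≤ 0)]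
    simp
  have h0N : (0:Int) ∈ nodes S := by
    simp only [nodes, PySem.List.mem_pyRange_one, PySem.List.len_eq]
    omega
  have hget0 : ∀ x, x ∈ nodes S → (PySem.List.pyGetD vis0 x false = true ↔ x = 0) := by
    intro x hx
    have hxb : 0 ≤ x ∧ x < (S.length : Int) := by
      simpa [nodes, PySem.List.mem_pyRange_one, PySem.List.len_eq] using hx
    rw [hv0, pyGetD_pySetD_bool (List.replicate S.length false) 0 x (by norm_num)
      (by simp; omega) hxb.1 (by simp; omega)]
    by_cases hx0 : x = 0
    · simp [hx0]
    · rw [if_neg hx0]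
      rw [PySem.List.pyGetD_eq_getElem _ _ hxb.1 (by simp; omega)]
      simp [hx0]
  have hm0 : ∀ x, markedP S vis0 x ↔ x = 0 := by
    intro x
    constructor
    · rintro ⟨hxN, hg⟩
      exact (hget0 x hxN).mp hg
    · rintro rfl
      exact ⟨h0N, (hget0 0 h0N).mpr rfl⟩
  have hmc0 : mcount S vis0 = 1 := by
    have hcg : (nodes S).countP (fun x => PySem.List.pyGetD vis0 x false)
        = (nodes S).countP (fun x => x == 0) := by
      refine List.countP_congr (fun x hx => ?_)
      rw [hget0 x hx]
      simp
    have : mcount S vis0 = (nodes S).countP (fun x => x == 0) := hcg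
    rw [this, ← List.count_eq_countP]
    exact List.count_eq_one_of_mem (PySem.List.nodup_pyRange_one _ _) h0N
  obtain ⟨c1, c2, c3, c4⟩ := bfs_loop_spec S S.length vis0 1 [0] hlen0
    (fun x hx => (hm0 x).mpr (List.mem_singleton.mp hx))
    (fun u hu hnotin v hv hham =>
      absurd (List.mem_singleton.mpr ((hm0 u).mp hu)) hnotin)
    (fun x hx => ((hm0 x).mp hx) ▸ Relation.ReflTransGen.refl)
    (by rw [hmc0]; norm_num)
    (by simp [hmc0]; omega)
  constructor
  · intro hyes x hx
    have hr2 : r.2 = PySem.List.len S := by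
      by_contra hno
      rw [if_neg hno] at hyes
      simp at hyes
    have hmfull : mcount S r.1 = S.length := by
      have : (mcount S r.1 : Int) = (S.length : Int) := by
        rw [← c1, hr2, PySem.List.len_eq]
      exact_mod_cast this
    have hall : ∀ y ∈ nodes S, PySem.List.pyGetD r.1 y false = true := by
      refine List.countP_eq_length.mp ?_
      rw [← mcount, hmfull, nodes_length]
    exact c3 x ⟨hx, hall x hx⟩
  · intro hall
    have key : ∀ x, Rch S 0 x → markedP S r.1 x := by
      intro x hrch
      induction hrch with
      | refl => exact c2 0 ((hm0 0).mpr rfl)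
      | @tail b c h1 hadj ih => exact c4 b ih c hadj.2.1 hadj.2.2
    have hfull : ∀ y ∈ nodes S, PySem.List.pyGetD r.1 y false = true :=
      fun y hy => (key y (hall y hy)).2
    have hmfull : mcount S r.1 = S.length := by
      have := List.countP_eq_length.mpr hfull
      rw [mcount, this, nodes_length]
    rw [if_pos (by rw [c1, hmfull, PySem.List.len_eq])]

lemma B_yes_or_no (S : List String) :
    can_visit_all_indices_alt S = "YES" ∨ can_visit_all_indices_alt S = "NO" := by
  rw [B_def]
  split_ifs <;> simp

lemma exists_iff_zero (S : List String) (hS : S ≠ []) :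
    (∃ i ∈ nodes S, ∀ x ∈ nodes S, Rch S i x) ↔ (∀ x ∈ nodes S, Rch S 0 x) := by
  have h0 : (0:Int) ∈ nodes S := by
    have := List.length_pos_of_ne_nil hS
    simp only [nodes, PySem.List.mem_pyRange_one, PySem.List.len_eq]
    omega
  constructor
  · rintro ⟨i, hi, hall⟩ x hx
    have h1 : Rch S i 0 := hall 0 h0
    have h2 : Rch S 0 i := Relation.ReflTransGen.symmetric (adj_symm S) h1
    exact h2.trans (hall x hx)
  · intro h
    exact ⟨0, h0, h⟩

lemma main_eq (S : List String) : can_visit_all_indices S = can_visit_all_indices_alt S := by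
  by_cases hS : S = []
  · subst hS
    rfl
  · have hiff : can_visit_all_indices S = "YES" ↔ can_visit_all_indices_alt S = "YES" := by
      rw [A_yes_iff, B_yes_iff S hS]
      exact exists_iff_zero S hS
    rcases A_yes_or_no S with hA | hA
    · rw [hA, hiff.mp hA]
    · rcases B_yes_or_no S with hB | hB
      · exact absurd (hiff.mpr hB) (by rw [hA]; simp)
      · rw [hA, hB]

-- ===== VERDICT (by name: the statement is the Claim_ definition above) =====
theorem can_visit_all_indices_spec : Claim_equal_can_visit_all_indices := by
  intro strings _
  unfold Spec_can_visit_all_indices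
  exact main_eq strings
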